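-- pv_equiv track=rewrite | github.com/reed-nicolas/pi0-quant | dependencies/fpex/model/bf16_exp_model.py | _low_mask
-- ===== SOURCE A (Python) =====
-- def _mask(width: int) -> int:
--     return (1 << width) - 1
--
-- def _low_mask(in_val: int, in_width: int, top_bound: int, bottom_bound: int) -> int:
--     """Python port of hardfloat.primitives.lowMask."""
--     assert top_bound != bottom_bound
--     num_in_vals = 1 << in_width
--
--     if top_bound < bottom_bound:
--         return _low_mask((~in_val) & _mask(in_width), in_width, num_in_vals - 1 - top_bound, num_in_vals - 1 - bottom_bound)
--
--     out_width = top_bound - bottom_bound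
--
--     if num_in_vals > 64:
--         mid = num_in_vals // 2
--         msb = (in_val >> (in_width - 1)) & 1
--         lsbs = in_val & _mask(in_width - 1)
--         if mid < top_bound:
--             if mid <= bottom_bound:
--                 if msb:
--                     return _low_mask(lsbs, in_width - 1, top_bound - mid, bottom_bound - mid)
--                 return 0
--             if msb:
--                 left = _low_mask(lsbs, in_width - 1, top_bound - mid, 0)
--                 right_width = mid - bottom_bound
--                 right = _mask(right_width)
--                 return (left << right_width) | right
--             return _low_mask(lsbs, in_width - 1, mid, bottom_bound)
--         if msb:
--             return _mask(out_width)
--         return _low_mask(lsbs, in_width - 1, top_bound, bottom_bound)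
--
--     # Base branch from HardFloat:
--     # shift = (BigInt(-1)<<numInVals).S>>in
--     # Reverse(shift(numInVals-1-bottom, numInVals-top))
--     shift_val = ((-1 << num_in_vals) >> in_val)
--     lo = num_in_vals - top_bound
--
--     sliced = 0
--     for i in range(out_width):
--         bit = (shift_val >> (lo + i)) & 1
--         sliced |= bit << i
--
--     rev = 0
--     for i in range(out_width):
--         if (sliced >> i) & 1:
--             rev |= 1 << (out_width - 1 - i)
--     return rev
-- ===== SOURCE B (Python) =====
-- def _low_mask(in_val: int, in_width: int, top_bound: int, bottom_bound: int) -> int: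
--     """Closed form of hardfloat lowMask: a contiguous low mask whose number of
--     ones is (in_val - bottom_bound) clamped to [0, top_bound - bottom_bound]."""
--     assert top_bound != bottom_bound
--     num_in_vals = 1 << in_width
--     if top_bound < bottom_bound:
--         in_val = ~in_val & (num_in_vals - 1)
--         top_bound, bottom_bound = num_in_vals - 1 - top_bound, num_in_vals - 1 - bottom_bound
--     ones = min(max(in_val - bottom_bound, 0), top_bound - bottom_bound)
--     return (1 << ones) - 1
-- ===== Notes on version B (the rewrite author's own statement) =====
-- stated objective: faster
-- what changed: B replaces A's per-bit divide-and-conquer recursion over in_width and the two bit-slice/bit-reverse loops by the closed form (1 << clamp(in_val - bottom_bound, 0, top_bound - bottom_bound)) - 1 (after the one symmetric swap).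
-- outside the precondition, e.g. on _low_mask(-1, 3, -1, -2): A raises ValueError, B returns 1; on _low_mask(256, 7, 64, 63): A returns 0, B returns 1; on _low_mask(-1, 7, 64, 63): A returns 1, B returns 0
import Mathlib
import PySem

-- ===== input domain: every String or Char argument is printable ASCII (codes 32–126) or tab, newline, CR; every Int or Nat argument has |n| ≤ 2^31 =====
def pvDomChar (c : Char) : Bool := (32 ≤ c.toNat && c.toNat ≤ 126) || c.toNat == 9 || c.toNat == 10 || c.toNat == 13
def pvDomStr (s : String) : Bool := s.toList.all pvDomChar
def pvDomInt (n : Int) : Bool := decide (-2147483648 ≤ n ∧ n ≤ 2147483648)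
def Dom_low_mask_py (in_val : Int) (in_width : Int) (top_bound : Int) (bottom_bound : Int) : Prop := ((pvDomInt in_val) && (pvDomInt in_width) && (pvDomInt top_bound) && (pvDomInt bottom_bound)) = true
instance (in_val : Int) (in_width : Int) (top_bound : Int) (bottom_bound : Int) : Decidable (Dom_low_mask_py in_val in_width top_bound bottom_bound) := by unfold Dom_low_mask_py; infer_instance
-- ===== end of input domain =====

-- B replaces A's per-bit recursion over in_width by the closed form
-- (1 << clamp(in_val - bottom_bound, 0, top_bound - bottom_bound)) - 1 (after the one symmetric swap).

-- ===== PORT A =====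
-- Python helper _mask(width) = (1 << width) - 1
def pymask (width : Int) : Int := ((1 : Int) <<< width.toNat) - 1

-- termination helper: 64 < 1 <<< n (over Int) forces 7 ≤ n
theorem pv_seven_le {n : Nat} (h : (64 : Int) < ((1 : Int) <<< n)) : 7 ≤ n := by
  by_contra hn
  rw [show ((1:Int) <<< n) = ((1 <<< n : Nat) : Int) from rfl, Nat.shiftLeft_eq, one_mul] at h
  have : (2 : Nat) ^ n ≤ 64 := by
    calc (2:Nat)^n ≤ 2^6 := Nat.pow_le_pow_right (by omega) (by omega)
    _ = 64 := by norm_num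
  omega

def low_mask_py (in_val : Int) (in_width : Int) (top_bound : Int) (bottom_bound : Int) : Int :=
  -- assert top_bound != bottom_bound : Pre_ excludes top_bound = bottom_bound
  let num_in_vals : Int := (1 : Int) <<< in_width.toNat
  if _hswap : top_bound < bottom_bound then
    low_mask_py (PySem.Int.band (Int.not in_val) (pymask in_width)) in_width
      (num_in_vals - 1 - top_bound) (num_in_vals - 1 - bottom_bound)
  else
    let out_width := top_bound - bottom_bound
    if _hbig : 64 < num_in_vals then
      let mid := PySem.Int.floordiv num_in_vals 2
      let msb := PySem.Int.band (in_val >>> (in_width - 1).toNat) 1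
      let lsbs := PySem.Int.band in_val (pymask (in_width - 1))
      if mid < top_bound then
        if mid ≤ bottom_bound then
          if msb ≠ 0 then
            low_mask_py lsbs (in_width - 1) (top_bound - mid) (bottom_bound - mid)
          else 0
        else if msb ≠ 0 then
          let left := low_mask_py lsbs (in_width - 1) (top_bound - mid) 0
          let right_width := mid - bottom_bound
          let right := pymask right_width
          PySem.Int.bor (left <<< right_width.toNat) right
        else
          low_mask_py lsbs (in_width - 1) mid bottom_bound
      else if msb ≠ 0 then pymask out_width
      else low_mask_py lsbs (in_width - 1) top_bound bottom_bound
    else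
      let shift_val := ((-1 : Int) <<< num_in_vals.toNat) >>> in_val.toNat
      let lo := num_in_vals - top_bound
      let sliced := (PySem.List.pyRange 0 out_width 1).foldl
        (fun sl i => PySem.Int.bor sl ((PySem.Int.band (shift_val >>> (lo + i).toNat) 1) <<< i.toNat)) 0
      let rev := (PySem.List.pyRange 0 out_width 1).foldl
        (fun rv i => if PySem.Int.band (sliced >>> i.toNat) 1 ≠ 0 then
            PySem.Int.bor rv ((1 : Int) <<< (out_width - 1 - i).toNat) else rv) 0
      rev
termination_by in_width.toNat * 2 + (if top_bound < bottom_bound then 1 else 0)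
decreasing_by
  · -- swap call: same width, swap flag drops (new top > new bottom)
    split <;> omega
  all_goals
    have h7 := pv_seven_le ‹_›
    split <;> omega

-- ===== PORT B =====
def low_mask_py_alt (in_val : Int) (in_width : Int) (top_bound : Int) (bottom_bound : Int) : Int :=
  let num_in_vals : Int := (1 : Int) <<< in_width.toNat
  let (v, t, b) :=
    if top_bound < bottom_bound then
      (PySem.Int.band (Int.not in_val) (num_in_vals - 1),
       num_in_vals - 1 - top_bound, num_in_vals - 1 - bottom_bound)
    else (in_val, top_bound, bottom_bound)
  let ones := min (max (v - b) 0) (t - b)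
  ((1 : Int) <<< ones.toNat) - 1

-- ===== PRECONDITION & SPEC =====
-- Pre_ is the domain on which A returns a value: nonnegative width, and either
-- top > bottom with 0 ≤ in_val (in_val < 2^in_width required only when in_width > 6,
-- where A's msb/lsbs split needs it) and top ≤ 2^in_width, or top < bottom (the swap
-- case, which masks in_val itself) with top ≥ -1.  Outside it A raises
-- (AssertionError on top = bottom, ValueError on a negative shift count) or whether
-- A returns at all depends on in_val's bit pattern (e.g. in_val outside
-- [0, 2^in_width) with in_width > 6), an accident of the recursion.
def Pre_low_mask_py (in_val : Int) (in_width : Int) (top_bound : Int) (bottom_bound : Int) : Prop :=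
  0 ≤ in_width ∧ top_bound ≠ bottom_bound ∧
  ((bottom_bound < top_bound ∧ 0 ≤ in_val ∧
      (in_val < 2 ^ in_width.toNat ∨ 2 ^ in_width.toNat ≤ 64) ∧
      top_bound ≤ 2 ^ in_width.toNat) ∨
   (top_bound < bottom_bound ∧ -1 ≤ top_bound))
instance (in_val : Int) (in_width : Int) (top_bound : Int) (bottom_bound : Int) : Decidable (Pre_low_mask_py in_val in_width top_bound bottom_bound) := by unfold Pre_low_mask_py; infer_instance

def pvWitness_low_mask_py : Int × Int × Int × Int := (1, 2, 3, 0)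

def Spec_low_mask_py (in_val : Int) (in_width : Int) (top_bound : Int) (bottom_bound : Int) (out : Int) : Prop := out = low_mask_py_alt in_val in_width top_bound bottom_bound
instance (in_val : Int) (in_width : Int) (top_bound : Int) (bottom_bound : Int) (out : Int) : Decidable (Spec_low_mask_py in_val in_width top_bound bottom_bound out) := by unfold Spec_low_mask_py; infer_instance

-- ===== CLAIM (what is proved, stated in full; the proofs are below) =====
def Claim_equal_low_mask_py : Prop := ∀ (in_val : Int) (in_width : Int) (top_bound : Int) (bottom_bound : Int), Dom_low_mask_py in_val in_width top_bound bottom_bound → Pre_low_mask_py in_val in_width top_bound bottom_bound → Spec_low_mask_py in_val in_width top_bound bottom_bound (low_mask_py in_val in_width top_bound bottom_bound)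

-- ===== LEMMAS AND PROOFS =====

-- Nat: or of disjoint summands is addition
theorem pv_lor_add (m q y : Nat) (hy : y < 2 ^ m) : (q * 2 ^ m) ||| y = q * 2 ^ m + y := by
  induction m generalizing q y with
  | zero => interval_cases y <;> simp
  | succ m ih =>
    have hb : y = Nat.bit (y.testBit 0) (y >>> 1) := (Nat.bit_testBit_zero_shiftRight_one y).symm
    have hq : q * 2 ^ (m+1) = Nat.bit false (q * 2 ^ m) := by
      simp [Nat.bit_val]; ring
    rw [hb, hq, Nat.lor_bit]
    rw [ih q (y >>> 1) (by rw [Nat.shiftRight_one]; omega)]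
    simp [Nat.bit_val, Nat.shiftRight_one]
    omega

-- Nat: (2^m - 1) >>> k is the shorter all-ones block
theorem pv_shr_mask (m k : Nat) : (2 ^ m - 1) >>> k = 2 ^ (m - k) - 1 := by
  apply Nat.eq_of_testBit_eq
  intro i
  rw [Nat.testBit_shiftRight, Nat.testBit_two_pow_sub_one, Nat.testBit_two_pow_sub_one]
  by_cases h : k + i < m <;> simp [h] <;> omega

-- Nat: the low bit of x >>> i is the i-th bit of x
theorem pv_shr_mod_two (x i : Nat) : (x >>> i) % 2 = if x.testBit i then 1 else 0 := by
  rw [Nat.testBit]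
  rcases Nat.mod_two_eq_zero_or_one (x >>> i) with h | h <;>
    simp [Nat.one_and_eq_mod_two, h]

-- bit k of the Python value (-1 << m) is 1 exactly from position m upward
theorem pv_bit_neg_shift (m k : Nat) :
    PySem.Int.band (((-1 : Int) <<< m) >>> k) 1 = if m ≤ k then 1 else 0 := by
  have h1 : ((-1 : Int) <<< m) >>> k = Int.negSucc ((2 ^ m - 1) >>> k) := by
    show (Int.negSucc 0) <<< m >>> k = _
    show Int.negSucc ((0 + 1) <<< m - 1) >>> k = _
    rw [Nat.shiftLeft_eq]
    norm_num
  rw [h1, pv_shr_mask, PySem.Int.band_one, PySem.Int.mod_eq_emod_of_pos (by omega)]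
  by_cases h : m ≤ k
  · have : m - k = 0 := by omega
    simp [this, h, Int.negSucc_eq]
  · have h2 : (1:Nat) ≤ m - k := by omega
    have hj : ∃ j, 2 ^ (m - k) = 2 * j ∧ 1 ≤ j := by
      refine ⟨2 ^ (m - k - 1), ?_, Nat.one_le_two_pow⟩
      rw [← pow_succ']; congr 1; omega
    rcases hj with ⟨j, hj, hj1⟩
    simp only [Int.negSucc_eq, h, if_false]
    have hcast : ((2 ^ (m - k) - 1 : Nat) : Int) = 2 * (j : Int) - 1 := by
      push_cast [hj]
      omega
    rw [hcast]
    omega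

-- bit i of 2^o - 2^c (c ≤ o) is 1 exactly on [c, o)
theorem pv_bit_mask (o c i : Nat) (hc : c ≤ o) :
    PySem.Int.band ((((2 ^ o - 2 ^ c : Nat) : Int)) >>> i) 1 = if c ≤ i ∧ i < o then 1 else 0 := by
  have hcast : (((2 ^ o - 2 ^ c : Nat) : Int)) >>> i = (((2 ^ o - 2 ^ c : Nat) >>> i : Nat) : Int) := rfl
  rw [hcast, show (1:Int) = ((1:Nat):Int) from rfl, PySem.Int.band_natCast]
  have hX : (2 ^ o - 2 ^ c : Nat) = (2 ^ (o - c) - 1) <<< c := by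
    rw [Nat.shiftLeft_eq, Nat.sub_mul, ← pow_add, one_mul]
    congr 2
    omega
  have htb : (2 ^ o - 2 ^ c : Nat).testBit i = decide (c ≤ i ∧ i < o) := by
    rw [hX, Nat.testBit_shiftLeft, Nat.testBit_two_pow_sub_one]
    by_cases h1 : c ≤ i <;> by_cases h2 : i < o <;> simp [h1, h2] <;> omega
  rw [Nat.and_one_is_mod, pv_shr_mod_two, htb]
  by_cases h : c ≤ i ∧ i < o <;> simp [h]

-- first base-branch loop: collecting the window bits yields 2^n - 2^(min n c)
theorem pv_loop1 (sh lo s : Int)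
    (hbit : ∀ k : Nat, PySem.Int.band (sh >>> (lo + (k : Int)).toNat) 1 = if s ≤ (k : Int) then 1 else 0)
    (n : Nat) :
    (List.map (fun k : Nat => (k : Int)) (List.range n)).foldl
      (fun sl i => PySem.Int.bor sl ((PySem.Int.band (sh >>> (lo + i).toNat) 1) <<< i.toNat)) 0
      = ((2 ^ n - 2 ^ (min n (max s 0).toNat) : Nat) : Int) := by
  induction n with
  | zero => simp
  | succ n ih =>
    rw [List.range_succ, List.map_append, List.foldl_append, ih]
    simp only [List.map_cons, List.map_nil, List.foldl_cons, List.foldl_nil]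
    rw [hbit n]
    set c := (max s 0).toNat with hc
    have hsc : (s ≤ (n : Int)) ↔ c ≤ n := by omega
    by_cases h : c ≤ n
    · rw [if_pos (hsc.mpr h), min_eq_right h, min_eq_right (by omega)]
      have hsh : ((1 : Int) <<< ((n : Int)).toNat) = (((2 ^ n : Nat)) : Int) := by
        rw [Int.toNat_natCast]
        show (((1 <<< n : Nat)) : Int) = _
        rw [Nat.shiftLeft_eq, one_mul]
      have h1c : (1:Nat) ≤ 2 ^ c := Nat.one_le_two_pow
      have hcn : (2:Nat) ^ c ≤ 2 ^ n := Nat.pow_le_pow_right (by omega) h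
      have hor : (2:Nat) ^ n ||| (2 ^ n - 2 ^ c) = 2 ^ n + (2 ^ n - 2 ^ c) := by
        simpa using pv_lor_add n 1 (2 ^ n - 2 ^ c) (by omega)
      rw [hsh, PySem.Int.bor_natCast, Nat.lor_comm, hor]
      have hp : (2:Nat) ^ (n+1) = 2 * 2 ^ n := by ring
      omega
    · rw [if_neg (fun hh => h (hsc.mp hh)), min_eq_left (by omega), min_eq_left (by omega)]
      have hz : ((0 : Int) <<< ((n : Int)).toNat) = 0 := by
        rw [Int.toNat_natCast]
        show (((0 <<< n : Nat)) : Int) = _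
        simp
      rw [hz]
      simp

-- second base-branch loop: bit-reversing 2^o - 2^c gives the low mask of o - c ones
theorem pv_loop2 (o c : Nat) (hc : c ≤ o) (n : Nat) (hn : n ≤ o) :
    (List.map (fun k : Nat => (k : Int)) (List.range n)).foldl
      (fun rv i => if PySem.Int.band ((((2 ^ o - 2 ^ c : Nat) : Int)) >>> i.toNat) 1 ≠ 0 then
          PySem.Int.bor rv ((1 : Int) <<< (((o : Int)) - 1 - i).toNat) else rv) 0
      = ((2 ^ (o - c) - 2 ^ (o - max n c) : Nat) : Int) := by
  induction n with
  | zero => simp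
  | succ n ih =>
    rw [List.range_succ, List.map_append, List.foldl_append, ih (by omega)]
    simp only [List.map_cons, List.map_nil, List.foldl_cons, List.foldl_nil, Int.toNat_natCast]
    simp only [Int.shiftRight_natCast_right, pv_bit_mask o c n hc]
    by_cases h : c ≤ n
    · rw [if_pos (by simp [h]; omega)]
      have hj : (((o : Int)) - 1 - (n : Int)).toNat = o - 1 - n := by omega
      rw [hj]
      have hmn : max n c = n := by omega
      have hmn1 : max (n+1) c = n + 1 := by omega
      rw [hmn, hmn1]
      have hsh : ((1 : Int) <<< ((o - 1 - n : Nat))) = (((2 ^ (o - 1 - n) : Nat)) : Int) := by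
        show (((1 <<< (o - 1 - n) : Nat)) : Int) = _
        rw [Nat.shiftLeft_eq, one_mul]
      have hacc : (2 ^ (o - c) - 2 ^ (o - n) : Nat) = (2 ^ (n - c) - 1) * 2 ^ (o - n) := by
        rw [Nat.sub_mul, ← pow_add, one_mul]
        congr 2
        omega
      rw [hacc, hsh, PySem.Int.bor_natCast]
      rw [pv_lor_add (o - n) (2 ^ (n - c) - 1) (2 ^ (o - 1 - n))
        (Nat.pow_lt_pow_right (by omega) (by omega))]
      have h1 : (2:Nat) ^ (o - n) = 2 * 2 ^ (o - 1 - n) := by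
        rw [← pow_succ']
        congr 1
        omega
      have h2 : (2:Nat) ^ (o - c) = 2 ^ (n - c) * 2 ^ (o - n) := by
        rw [← pow_add]
        congr 1
        omega
      have h3 : o - (n + 1) = o - 1 - n := by omega
      rw [h3]
      have h5 : (2 ^ (n - c) - 1) * 2 ^ (o - n) = 2 ^ (n - c) * 2 ^ (o - n) - 2 ^ (o - n) := by
        rw [Nat.sub_mul, one_mul]
      rw [h5, ← h2]
      have h4 : (1:Nat) ≤ 2 ^ (o - 1 - n) := Nat.one_le_two_pow
      have h6 : (2:Nat) ^ (o - n) ≤ 2 ^ (o - c) := Nat.pow_le_pow_right (by omega) (by omega)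
      clear ih hacc h2 h5 hsh hj hmn hmn1
      omega
    · rw [if_neg (by simp [h])]
      have hmn : max n c = c := by omega
      have hmn1 : max (n+1) c = c := by omega
      rw [hmn, hmn1]

-- any Python int masked to w bits lies in [0, 2^w)
theorem pv_band_mask_bounds (x : Int) (n : Nat) :
    0 ≤ PySem.Int.band x (((2 ^ n : Nat) : Int) - 1) ∧
    PySem.Int.band x (((2 ^ n : Nat) : Int) - 1) < ((2 ^ n : Nat) : Int) := by
  have h1 : (1:Nat) ≤ 2 ^ n := Nat.one_le_two_pow
  have hm : ((2 ^ n : Nat) : Int) - 1 = (((2 ^ n - 1 : Nat)) : Int) := by omega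
  rw [hm]
  rcases x with m | m
  · rw [show (Int.ofNat m) = ((m : Nat) : Int) from rfl, PySem.Int.band_natCast,
      Nat.and_two_pow_sub_one_eq_mod]
    have := Nat.mod_lt m (show 0 < 2^n by omega)
    omega
  · have hneg : ¬ (0 : Int) ≤ Int.negSucc m := by simp
    have hpos : (0 : Int) ≤ ((2 ^ n - 1 : Nat) : Int) := by positivity
    simp only [PySem.Int.band, if_neg hneg, if_pos hpos]
    have heq : ((-Int.negSucc m - 1).toNat) = m := by
      rw [Int.negSucc_eq]
      omega
    rw [heq]
    have hle := Nat.and_le_left (n := (((2 ^ n - 1 : Nat) : Int)).toNat) (m := m)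
    omega

-- base branch of A (2^W ≤ 64) computes the clamped low mask
theorem pv_key_base (W : Nat) (hW : (2:Nat) ^ W ≤ 64) (v t b : Int) (h0 : 0 ≤ v)
    (hbt : b < t) (hle : t ≤ ((2 ^ W : Nat) : Int)) :
    low_mask_py v (W : Int) t b = 2 ^ ((min (max (v - b) 0) (t - b)).toNat) - 1 := by
  rw [low_mask_py]
  have hNum : ((1:Int) <<< W) = ((2 ^ W : Nat) : Int) := by
    rw [show ((1:Int) <<< W) = ((1 <<< W : Nat) : Int) from rfl, Nat.shiftLeft_eq, one_mul]
  simp only [Int.toNat_natCast, hNum]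
  rw [dif_neg (by omega : ¬ t < b)]
  rw [dif_neg (by omega : ¬ (64:Int) < ((2 ^ W : Nat) : Int))]
  set o := (t - b).toNat with ho
  have htb : t - b = ((o : Nat) : Int) := by omega
  rw [htb, PySem.List.pyRange_zero_natCast]
  have hbit : ∀ k : Nat,
      PySem.Int.band (((-1 : Int) <<< (2 ^ W : Nat) >>> v.toNat) >>> ((((2 ^ W : Nat) : Int)) - t + (k : Int)).toNat) 1
        = if t - v ≤ (k : Int) then 1 else 0 := by
    intro k
    rw [← Int.shiftRight_add]
    refine (pv_bit_neg_shift ((2 ^ W : Nat)) (v.toNat + ((((2 ^ W : Nat) : Int)) - t + (k : Int)).toNat)).trans ?_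
    split_ifs with hc1 hc2 hc2 <;> first | rfl | omega
  simp only [pv_loop1 ((-1 : Int) <<< (2 ^ W : Nat) >>> v.toNat) ((((2 ^ W : Nat) : Int)) - t) (t - v) hbit o]
  set c := min o (max (t - v) 0).toNat with hc
  simp only [pv_loop2 o c (by omega) o (le_refl o)]
  have hmax : o - max o c = 0 := by omega
  rw [hmax, pow_zero]
  have he : o - c = (min (max (v - b) 0) ((o : Nat) : Int)).toNat := by omega
  rw [← he, Nat.cast_sub (Nat.one_le_two_pow), Nat.cast_pow]
  norm_num



-- A on the already-swapped domain computes the clamped low mask (B's closed form)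
theorem pv_key (W : Nat) : ∀ v t b : Int, 0 ≤ v → v < ((2 ^ W : Nat) : Int) → b < t →
    t ≤ ((2 ^ W : Nat) : Int) →
    low_mask_py v (W : Int) t b = 2 ^ ((min (max (v - b) 0) (t - b)).toNat) - 1 := by
  induction W with
  | zero =>
    intro v t b h0 h1 hbt hle
    exact pv_key_base 0 (by norm_num) v t b h0 hbt hle
  | succ n ih =>
    intro v t b h0 h1 hbt hle
    by_cases hbig : (2:Nat) ^ (n+1) ≤ 64
    · exact pv_key_base (n+1) hbig v t b h0 hbt hle
    · obtain ⟨nv, rfl⟩ := Int.eq_ofNat_of_zero_le h0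
      rw [low_mask_py]
      have hNum : ((1:Int) <<< (n+1)) = ((2 ^ (n+1) : Nat) : Int) := by
        rw [show ((1:Int) <<< (n+1)) = ((1 <<< (n+1) : Nat) : Int) from rfl, Nat.shiftLeft_eq, one_mul]
      have hw1 : ((n+1 : Nat) : Int) - 1 = (n : Int) := by push_cast; ring
      have hmid : PySem.Int.floordiv ((2 ^ (n+1) : Nat) : Int) 2 = ((2 ^ n : Nat) : Int) := by
        rw [PySem.Int.floordiv_eq_ediv_of_pos (by omega),
          show ((2 ^ (n+1) : Nat) : Int) = ((2 ^ n : Nat) : Int) * 2 by push_cast; ring]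
        exact Int.mul_ediv_cancel _ (by omega)
      simp only [Int.toNat_natCast, hNum, hw1, hmid]
      rw [dif_neg (by omega : ¬ t < b)]
      rw [dif_pos (by omega : (64:Int) < ((2 ^ (n+1) : Nat) : Int))]
      -- common facts
      have hcast2 : ((2 ^ (n+1) : Nat) : Int) = 2 * ((2 ^ n : Nat) : Int) := by push_cast; ring
      have hnvlt : nv < 2 ^ (n+1) := by omega
      have hmlt : nv % 2 ^ n < 2 ^ n := Nat.mod_lt _ (Nat.two_pow_pos n)
      -- the msb test
      have hmsbv : PySem.Int.band (((nv : Nat) : Int) >>> n) 1 = if 2 ^ n ≤ nv then 1 else 0 := by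
        rw [show (((nv : Nat) : Int) >>> n) = ((nv >>> n : Nat) : Int) from rfl,
          show (1:Int) = ((1:Nat):Int) from rfl, PySem.Int.band_natCast,
          Nat.and_one_is_mod, Nat.shiftRight_eq_div_pow]
        by_cases hm : 2 ^ n ≤ nv
        · have hd : nv / 2 ^ n = 1 := by
            have h2 : (2:Nat) ^ (n+1) = 2 * 2 ^ n := by ring
            rw [Nat.div_eq_sub_div (Nat.two_pow_pos n) hm, Nat.div_eq_of_lt (by omega)]
          simp [hd, hm]
        · have hd : nv / 2 ^ n = 0 := Nat.div_eq_of_lt (by omega)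
          simp [hd, hm]
      -- the low bits
      have hlsbs : PySem.Int.band ((nv : Nat) : Int) (pymask ((n:Nat) : Int)) = ((nv % 2 ^ n : Nat) : Int) := by
        rw [pymask, Int.toNat_natCast,
          show ((1:Int) <<< n) = ((2 ^ n : Nat) : Int) by
            rw [show ((1:Int) <<< n) = ((1 <<< n : Nat) : Int) from rfl, Nat.shiftLeft_eq, one_mul],
          show ((2 ^ n : Nat) : Int) - 1 = ((2 ^ n - 1 : Nat) : Int) by
            have := Nat.one_le_two_pow (n := n); omega,
          PySem.Int.band_natCast, Nat.and_two_pow_sub_one_eq_mod]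
      simp only [hmsbv, hlsbs]
      -- IH bounds common
      have hmod0 : (0:Int) ≤ ((nv % 2 ^ n : Nat) : Int) := by positivity
      have hmodlt : ((nv % 2 ^ n : Nat) : Int) < ((2 ^ n : Nat) : Int) := by exact_mod_cast hmlt
      by_cases hmt : ((2 ^ n : Nat) : Int) < t
      · rw [if_pos hmt]
        by_cases hmb : ((2 ^ n : Nat) : Int) ≤ b
        · rw [if_pos hmb]
          by_cases hmsb : 2 ^ n ≤ nv
          · rw [if_pos (by simp [hmsb] : (if 2 ^ n ≤ nv then (1:Int) else 0) ≠ 0)]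
            have hsplit : nv % 2 ^ n = nv - 2 ^ n := by
              rw [Nat.mod_eq_sub_mod hmsb, Nat.mod_eq_of_lt (by omega)]
            rw [ih ((nv % 2 ^ n : Nat) : Int) (t - ((2 ^ n : Nat) : Int)) (b - ((2 ^ n : Nat) : Int))
              hmod0 hmodlt (by omega) (by omega)]
            have hE : ((min (max (((nv % 2 ^ n : Nat) : Int) - (b - ((2 ^ n : Nat) : Int))) 0)
                (t - ((2 ^ n : Nat) : Int) - (b - ((2 ^ n : Nat) : Int)))).toNat)
                = ((min (max (((nv : Nat) : Int) - b) 0) (t - b)).toNat) := by omega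
            rw [hE]
          · rw [if_neg (by simp [hmsb] : ¬ (if 2 ^ n ≤ nv then (1:Int) else 0) ≠ 0)]
            have hE : ((min (max (((nv : Nat) : Int) - b) 0) (t - b)).toNat) = 0 := by omega
            rw [hE, pow_zero]
            norm_num
        · rw [if_neg hmb]
          by_cases hmsb : 2 ^ n ≤ nv
          · rw [if_pos (by simp [hmsb] : (if 2 ^ n ≤ nv then (1:Int) else 0) ≠ 0)]
            have hsplit : nv % 2 ^ n = nv - 2 ^ n := by
              rw [Nat.mod_eq_sub_mod hmsb, Nat.mod_eq_of_lt (by omega)]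
            rw [ih ((nv % 2 ^ n : Nat) : Int) (t - ((2 ^ n : Nat) : Int)) 0
              hmod0 hmodlt (by omega) (by omega)]
            -- bor (mask-left <<< rw) (pymask rw) = full mask
            set rN := (((2 ^ n : Nat) : Int) - b).toNat with hrN
            have hrNpos : 1 ≤ rN := by omega
            have hrw : ((2 ^ n : Nat) : Int) - b = ((rN : Nat) : Int) := by omega
            set L := ((min (max (((nv % 2 ^ n : Nat) : Int) - 0) 0) (t - ((2 ^ n : Nat) : Int) - 0)).toNat) with hL
            have hleft : ((2:Int) ^ L - 1) = ((2 ^ L - 1 : Nat) : Int) := by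
              have := Nat.one_le_two_pow (n := L)
              push_cast [Nat.cast_sub this]
              ring
            rw [hrw, hleft, pymask, Int.toNat_natCast,
              show (((2 ^ L - 1 : Nat) : Int) <<< rN) = (((2 ^ L - 1 : Nat) <<< rN : Nat) : Int) from rfl,
              show ((1:Int) <<< rN) = ((2 ^ rN : Nat) : Int) by
                rw [show ((1:Int) <<< rN) = ((1 <<< rN : Nat) : Int) from rfl, Nat.shiftLeft_eq, one_mul],
              show ((2 ^ rN : Nat) : Int) - 1 = ((2 ^ rN - 1 : Nat) : Int) by
                have := Nat.one_le_two_pow (n := rN); omega,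
              PySem.Int.bor_natCast]
            rw [Nat.shiftLeft_eq, pv_lor_add rN (2 ^ L - 1) (2 ^ rN - 1)
              (by have := Nat.one_le_two_pow (n := rN); omega)]
            have hE : ((min (max (((nv : Nat) : Int) - b) 0) (t - b)).toNat) = L + rN := by omega
            rw [hE]
            have hgoalN : (2 ^ L - 1) * 2 ^ rN + (2 ^ rN - 1) = 2 ^ (L + rN) - 1 := by
              rw [Nat.sub_mul, one_mul, ← pow_add]
              have h1 : (1:Nat) ≤ 2 ^ rN := Nat.one_le_two_pow
              have h2 : (2:Nat) ^ rN ≤ 2 ^ (L + rN) := Nat.pow_le_pow_right (by omega) (by omega)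
              omega
            rw [hgoalN]
            have := Nat.one_le_two_pow (n := L + rN)
            push_cast [Nat.cast_sub this]
            ring
          · rw [if_neg (by simp [hmsb] : ¬ (if 2 ^ n ≤ nv then (1:Int) else 0) ≠ 0)]
            have hsame : nv % 2 ^ n = nv := Nat.mod_eq_of_lt (by omega)
            rw [ih ((nv % 2 ^ n : Nat) : Int) ((2 ^ n : Nat) : Int) b
              hmod0 hmodlt (by omega) (by omega)]
            have hE : ((min (max (((nv % 2 ^ n : Nat) : Int) - b) 0) (((2 ^ n : Nat) : Int) - b)).toNat)
                = ((min (max (((nv : Nat) : Int) - b) 0) (t - b)).toNat) := by omega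
            rw [hE]
      · rw [if_neg hmt]
        by_cases hmsb : 2 ^ n ≤ nv
        · rw [if_pos (by simp [hmsb] : (if 2 ^ n ≤ nv then (1:Int) else 0) ≠ 0)]
          rw [pymask]
          have hob : (t - b).toNat = ((min (max (((nv : Nat) : Int) - b) 0) (t - b)).toNat) := by omega
          rw [← hob,
            show ((1:Int) <<< (t - b).toNat) = ((1 <<< (t - b).toNat : Nat) : Int) from rfl,
            Nat.shiftLeft_eq, one_mul]
          push_cast
          ring
        · rw [if_neg (by simp [hmsb] : ¬ (if 2 ^ n ≤ nv then (1:Int) else 0) ≠ 0)]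
          have hsame : nv % 2 ^ n = nv := Nat.mod_eq_of_lt (by omega)
          rw [ih ((nv % 2 ^ n : Nat) : Int) t b hmod0 hmodlt (by omega) (by omega)]
          rw [hsame]

-- shifting 1 left is a power of two
theorem pv_one_shl (E : Nat) : ((1:Int) <<< E) = (2:Int) ^ E := by
  rw [show ((1:Int) <<< E) = ((1 <<< E : Nat) : Int) from rfl, Nat.shiftLeft_eq, one_mul]
  push_cast
  ring

-- ===== VERDICT (by name: the statement is the Claim_ definition above) =====
theorem low_mask_py_spec : Claim_equal_low_mask_py := by
  intro v w t b _hdom hpre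
  unfold Spec_low_mask_py
  obtain ⟨hw0, hne, hcases⟩ := hpre
  obtain ⟨W, rfl⟩ := Int.eq_ofNat_of_zero_le hw0
  rw [Int.toNat_natCast] at hcases
  have hPP : ((2 ^ W : Nat) : Int) = (2:Int) ^ W := by push_cast; ring
  rw [low_mask_py_alt]
  simp only [Int.toNat_natCast]
  by_cases hsw : t < b
  · rw [if_pos hsw]
    rw [low_mask_py]
    simp only [Int.toNat_natCast]
    rw [dif_pos hsw]
    rw [pymask, Int.toNat_natCast]
    have ht1 : -1 ≤ t := by rcases hcases with h | h <;> omega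
    have hbd := pv_band_mask_bounds (Int.not v) W
    rw [show ((1:Int) <<< W) = ((2 ^ W : Nat) : Int) by rw [pv_one_shl, hPP]]
    rw [pv_key W (PySem.Int.band (Int.not v) (((2 ^ W : Nat) : Int) - 1))
      (((2 ^ W : Nat) : Int) - 1 - t) (((2 ^ W : Nat) : Int) - 1 - b)
      hbd.1 hbd.2 (by omega) (by omega)]
    rw [pv_one_shl]
  · rw [if_neg hsw]
    obtain ⟨hbt, hv0, hvlt, hle⟩ : b < t ∧ 0 ≤ v ∧ (v < (2:Int) ^ W ∨ (2:Nat) ^ W ≤ 64) ∧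
        t ≤ (2:Int) ^ W := by
      rcases hcases with h | h
      · refine ⟨h.1, h.2.1, ?_, by omega⟩
        rcases h.2.2.1 with h' | h'
        · left; omega
        · right; omega
      · omega
    rcases hvlt with hvlt | hvlt
    · rw [pv_key W v t b hv0 (by omega) hbt (by omega)]
      rw [pv_one_shl]
    · rw [pv_key_base W hvlt v t b hv0 hbt (by omega)]
      rw [pv_one_shl]
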